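-- pv_equiv track=rewrite | github.com/MoaminSafari/Streamlit-Geospatial-Transport-Analyzer | operations/config.py | _get_default_field
-- ===== SOURCE A (Python) =====
-- from typing import Dict, List
--
-- def _get_default_field(shapefile_key: str, fields: List[str]) -> str:
--     """
--     Determine the default field for a shapefile based on available fields.
--
--     Args:
--         shapefile_key: The shapefile identifier
--         fields: List of available fields
--
--     Returns:
--         Default field name
--     """
--     # Priority order for default field selection
--     priority_fields = [
--         "CODE", "DISTRICT", "SUBREGION", "ZoneNumber",
--         "OBJECTID", "ID", "FID", "Name"
--     ]
--
--     for field in priority_fields: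
--         if field in fields:
--             return field
--
--     # Return first available field as fallback
--     return fields[0] if fields else "OBJECTID"
-- ===== SOURCE B (Python) =====
-- def _get_default_field(shapefile_key: str, fields: list) -> str:
--     """Pick the default field by priority rank: iterate over `fields` once,
--     tracking the field whose priority rank is smallest."""
--     rank = {
--         "CODE": 0, "DISTRICT": 1, "SUBREGION": 2, "ZoneNumber": 3,
--         "OBJECTID": 4, "ID": 5, "FID": 6, "Name": 7,
--     }
--     best = None  # (field, rank)
--     for f in fields:
--         r = rank.get(f)
--         if r is not None and (best is None or r < best[1]):
--             best = (f, r)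
--     if best is not None:
--         return best[0]
--     return fields[0] if fields else "OBJECTID"
-- ===== Notes on version B (the rewrite author's own statement) =====
-- stated objective: alternative
-- what changed: B replaces A's scan over the priority list with membership tests against `fields` by a single pass over `fields` guided by a rank dictionary, keeping the field of minimal rank; equivalence relies on ranks being unique.
import Mathlib
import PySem

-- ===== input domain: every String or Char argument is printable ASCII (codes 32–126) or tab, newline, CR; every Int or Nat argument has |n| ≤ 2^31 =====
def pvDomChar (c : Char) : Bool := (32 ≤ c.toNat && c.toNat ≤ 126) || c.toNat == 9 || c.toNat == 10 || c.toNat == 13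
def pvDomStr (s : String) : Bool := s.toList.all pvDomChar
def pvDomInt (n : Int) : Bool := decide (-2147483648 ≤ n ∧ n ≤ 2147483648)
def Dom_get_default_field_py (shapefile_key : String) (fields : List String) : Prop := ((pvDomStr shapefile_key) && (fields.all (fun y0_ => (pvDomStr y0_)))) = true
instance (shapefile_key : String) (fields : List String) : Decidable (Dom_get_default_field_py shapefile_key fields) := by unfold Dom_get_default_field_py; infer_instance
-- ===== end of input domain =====

-- B differs from A structurally: one pass over `fields` with a rank dictionary instead of
-- scanning the fixed priority list with membership tests; same return value everywhere.

-- ===== PORT A =====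
-- A's `for field in priority_fields: if field in fields: return field` loop.
def pvLoopA (ps : List String) (fields : List String) : Option String :=
  match ps with
  | [] => none
  | p :: rest => if p ∈ fields then some p else pvLoopA rest fields

def get_default_field_py (_shapefile_key : String) (fields : List String) : String :=
  let priority_fields := ["CODE", "DISTRICT", "SUBREGION", "ZoneNumber",
                          "OBJECTID", "ID", "FID", "Name"]
  match pvLoopA priority_fields fields with
  | some field => field
  | none => match fields with
            | [] => "OBJECTID"
            | f :: _ => f

-- ===== PORT B =====
-- B's rank dictionary.
def pvRankD : PySem.Dict String Int :=
  PySem.Dict.ofList [("CODE", 0), ("DISTRICT", 1), ("SUBREGION", 2), ("ZoneNumber", 3),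
                     ("OBJECTID", 4), ("ID", 5), ("FID", 6), ("Name", 7)]

-- one iteration of B's `for f in fields` loop updating `best`
def pvStepB (best : Option (String × Int)) (f : String) : Option (String × Int) :=
  match pvRankD.get? f with
  | none => best
  | some r =>
    match best with
    | none => some (f, r)
    | some (_, br) => if r < br then some (f, r) else best

def get_default_field_py_alt (_shapefile_key : String) (fields : List String) : String :=
  match fields.foldl pvStepB none with
  | some (f, _) => f
  | none => match fields with
            | [] => "OBJECTID"
            | f :: _ => f

-- ===== PRECONDITION & SPEC =====
def Spec_get_default_field_py (shapefile_key : String) (fields : List String) (out : String) : Prop := out = get_default_field_py_alt shapefile_key fields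
instance (shapefile_key : String) (fields : List String) (out : String) : Decidable (Spec_get_default_field_py shapefile_key fields out) := by unfold Spec_get_default_field_py; infer_instance

-- ===== CLAIM (what is proved, stated in full; the proofs are below) =====
def Claim_equal_get_default_field_py : Prop := ∀ (shapefile_key : String) (fields : List String), Dom_get_default_field_py shapefile_key fields → Spec_get_default_field_py shapefile_key fields (get_default_field_py shapefile_key fields)

-- ===== LEMMAS AND PROOFS =====

lemma pvStepB_rank_none (o : Option (String × Int)) (f : String)
    (h : pvRankD.get? f = none) : pvStepB o f = o := by
  simp [pvStepB, h]

lemma pvStepB_rank_some_none (f : String) (r : Int)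
    (h : pvRankD.get? f = some r) : pvStepB none f = some (f, r) := by
  simp [pvStepB, h]

lemma pvStepB_rank_some_some (f : String) (r : Int) (bf : String) (br : Int)
    (h : pvRankD.get? f = some r) :
    pvStepB (some (bf, br)) f = if r < br then some (f, r) else some (bf, br) := by
  simp [pvStepB, h]

-- If B's fold ends with `none`, no field of `fields` has a rank (and it started from `none`).
lemma pv_fold_none (fields : List String) (o : Option (String × Int))
    (h : fields.foldl pvStepB o = none) :
    o = none ∧ ∀ g ∈ fields, pvRankD.get? g = none := by
  induction fields generalizing o with
  | nil => simpa using h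
  | cons a t ih =>
    simp only [List.foldl_cons] at h
    obtain ⟨h1, h2⟩ := ih (pvStepB o a) h
    cases hr : pvRankD.get? a with
    | none =>
      rw [pvStepB_rank_none o a hr] at h1
      refine ⟨h1, ?_⟩
      intro g hg
      rcases List.mem_cons.mp hg with rfl | hg
      · exact hr
      · exact h2 g hg
    | some r =>
      exfalso
      cases o with
      | none => rw [pvStepB_rank_some_none a r hr] at h1; exact absurd h1 (by simp)
      | some b =>
        rcases b with ⟨bf, br⟩
        rw [pvStepB_rank_some_some a r bf br hr] at h1
        split at h1 <;> exact absurd h1 (by simp)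

-- Characterisation of B's fold when it ends with `some (f, r)`.
lemma pv_fold_some (fields : List String) (o : Option (String × Int)) (f : String) (r : Int)
    (ho : ∀ g s, o = some (g, s) → pvRankD.get? g = some s)
    (h : fields.foldl pvStepB o = some (f, r)) :
    pvRankD.get? f = some r ∧ (f ∈ fields ∨ o = some (f, r)) ∧
    (∀ g ∈ fields, ∀ s, pvRankD.get? g = some s → r ≤ s) ∧
    (∀ g s, o = some (g, s) → r ≤ s) := by
  induction fields generalizing o with
  | nil =>
    simp only [List.foldl_nil] at h
    refine ⟨ho f r h, Or.inr h, by simp, ?_⟩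
    intro g s hgs; rw [h] at hgs
    cases hgs; exact le_refl _
  | cons a t ih =>
    simp only [List.foldl_cons] at h
    -- describe the state after one step
    have hcase : (pvStepB o a = o ∧ pvRankD.get? a = none) ∨
        (∃ ra, pvRankD.get? a = some ra ∧
          ((pvStepB o a = some (a, ra) ∧ ∀ g s, o = some (g, s) → ra ≤ s) ∨
           pvStepB o a = o)) := by
      cases hr : pvRankD.get? a with
      | none => exact Or.inl ⟨pvStepB_rank_none o a hr, rfl⟩
      | some ra =>
        refine Or.inr ⟨ra, rfl, ?_⟩
        cases o with
        | none =>
          exact Or.inl ⟨pvStepB_rank_some_none a ra hr, by intro g s hgs; exact absurd hgs (by simp)⟩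
        | some b =>
          rcases b with ⟨bf, br⟩
          rw [pvStepB_rank_some_some a ra bf br hr]
          by_cases hlt : ra < br
          · refine Or.inl ⟨by simp [hlt], ?_⟩
            intro g s hgs; cases hgs; omega
          · exact Or.inr (by simp [hlt])
    have ho' : ∀ g s, pvStepB o a = some (g, s) → pvRankD.get? g = some s := by
      intro g s hgs
      rcases hcase with ⟨he, _⟩ | ⟨ra, hra, ⟨he, _⟩ | he⟩
      · exact ho g s (he ▸ hgs)
      · rw [he] at hgs; cases hgs; exact hra
      · exact ho g s (he ▸ hgs)
    obtain ⟨h1, h2, h3, h4⟩ := ih (pvStepB o a) ho' h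
    refine ⟨h1, ?_, ?_, ?_⟩
    · -- membership
      rcases h2 with h2 | h2
      · exact Or.inl (List.mem_cons_of_mem _ h2)
      · rcases hcase with ⟨he, _⟩ | ⟨ra, _, ⟨he, _⟩ | he⟩
        · exact Or.inr (he ▸ h2)
        · rw [he] at h2; cases h2; exact Or.inl (List.mem_cons_self ..)
        · exact Or.inr (he ▸ h2)
    · -- minimality over a :: t
      intro g hg s hgs
      rcases List.mem_cons.mp hg with rfl | hg
      · rcases hcase with ⟨_, hnone⟩ | ⟨ra, hra, ⟨he, _⟩ | he⟩
        · rw [hgs] at hnone; exact absurd hnone (by simp)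
        · have hra' : ra = s := by rw [hgs] at hra; exact (Option.some.inj hra).symm
          have hge := h4 g ra (by rw [he])
          omega
        · -- step left the state unchanged
          cases ho2 : o with
          | none =>
            rw [ho2, pvStepB_rank_some_none g s hgs] at he
            exact absurd he (by simp)
          | some b =>
            rcases b with ⟨bf, br⟩
            rw [ho2, pvStepB_rank_some_some g s bf br hgs] at he
            have hbr : r ≤ br :=
              h4 bf br (by rw [ho2, pvStepB_rank_some_some g s bf br hgs]; exact he)
            by_cases hlt : s < br
            · rw [if_pos hlt] at he
              have : s = br := congrArg (fun x => (x.getD ("", 0)).2) he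
              omega
            · omega
      · exact h3 g hg s hgs
    · -- bound against the initial state
      intro g s hgs
      rcases hcase with ⟨he, _⟩ | ⟨ra, hra, ⟨he, hle⟩ | he⟩
      · exact h4 g s (by rw [he, hgs])
      · have h1' := h4 a ra (by rw [he])
        have := hle g s hgs
        omega
      · exact h4 g s (by rw [he, hgs])

-- Inverting the rank dictionary: its eight entries.
lemma pv_rank_inv (f : String) (r : Int) (h : pvRankD.get? f = some r) :
    (f = "CODE" ∧ r = 0) ∨ (f = "DISTRICT" ∧ r = 1) ∨ (f = "SUBREGION" ∧ r = 2) ∨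
    (f = "ZoneNumber" ∧ r = 3) ∨ (f = "OBJECTID" ∧ r = 4) ∨ (f = "ID" ∧ r = 5) ∨
    (f = "FID" ∧ r = 6) ∨ (f = "Name" ∧ r = 7) := by
  have hd : pvRankD = PySem.Dict.mk [("CODE", 0), ("DISTRICT", 1), ("SUBREGION", 2), ("ZoneNumber", 3),
                     ("OBJECTID", 4), ("ID", 5), ("FID", 6), ("Name", 7)] := by decide
  rw [hd] at h
  simp only [PySem.Dict.get?_mk_cons] at h
  split_ifs at h with h1 h2 h3 h4 h5 h6 h7 h8
  · exact Or.inl ⟨(beq_iff_eq.mp h1).symm, (Option.some.inj h).symm⟩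
  · exact Or.inr (Or.inl ⟨(beq_iff_eq.mp h2).symm, (Option.some.inj h).symm⟩)
  · exact Or.inr (Or.inr (Or.inl ⟨(beq_iff_eq.mp h3).symm, (Option.some.inj h).symm⟩))
  · exact Or.inr (Or.inr (Or.inr (Or.inl ⟨(beq_iff_eq.mp h4).symm, (Option.some.inj h).symm⟩)))
  · exact Or.inr (Or.inr (Or.inr (Or.inr (Or.inl ⟨(beq_iff_eq.mp h5).symm, (Option.some.inj h).symm⟩))))
  · exact Or.inr (Or.inr (Or.inr (Or.inr (Or.inr (Or.inl ⟨(beq_iff_eq.mp h6).symm, (Option.some.inj h).symm⟩)))))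
  · exact Or.inr (Or.inr (Or.inr (Or.inr (Or.inr (Or.inr (Or.inl ⟨(beq_iff_eq.mp h7).symm, (Option.some.inj h).symm⟩))))))
  · exact Or.inr (Or.inr (Or.inr (Or.inr (Or.inr (Or.inr (Or.inr ⟨(beq_iff_eq.mp h8).symm, (Option.some.inj h).symm⟩))))))
  · simp [PySem.Dict.get?] at h

theorem get_default_field_py_spec : Claim_equal_get_default_field_py := by
  intro shapefile_key fields _
  show get_default_field_py shapefile_key fields = get_default_field_py_alt shapefile_key fields
  unfold get_default_field_py get_default_field_py_alt
  cases h : fields.foldl pvStepB none with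
  | none =>
    obtain ⟨-, hall⟩ := pv_fold_none fields none h
    have hn : ∀ p : String, pvRankD.get? p ≠ none → p ∉ fields := by
      intro p hp hm; exact hp (hall p hm)
    have h0 := hn "CODE" (by decide)
    have h1 := hn "DISTRICT" (by decide)
    have h2 := hn "SUBREGION" (by decide)
    have h3 := hn "ZoneNumber" (by decide)
    have h4 := hn "OBJECTID" (by decide)
    have h5 := hn "ID" (by decide)
    have h6 := hn "FID" (by decide)
    have h7 := hn "Name" (by decide)
    simp [pvLoopA, h0, h1, h2, h3, h4, h5, h6, h7]
  | some p =>
    rcases p with ⟨f, r⟩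
    obtain ⟨hr, hmem, hmin, -⟩ := pv_fold_some fields none f r (by simp) h
    have hmemf : f ∈ fields := hmem.resolve_right (by simp)
    have hnot : ∀ p : String, ∀ s : Int, pvRankD.get? p = some s → s < r → p ∉ fields := by
      intro p s hps hlt hpm
      have := hmin p hpm s hps; omega
    rcases pv_rank_inv f r hr with ⟨rfl, rfl⟩ | ⟨rfl, rfl⟩ | ⟨rfl, rfl⟩ | ⟨rfl, rfl⟩ |
      ⟨rfl, rfl⟩ | ⟨rfl, rfl⟩ | ⟨rfl, rfl⟩ | ⟨rfl, rfl⟩ <;>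
      simp [pvLoopA, hmemf,
        hnot "CODE" 0 (by decide), hnot "DISTRICT" 1 (by decide),
        hnot "SUBREGION" 2 (by decide), hnot "ZoneNumber" 3 (by decide),
        hnot "OBJECTID" 4 (by decide), hnot "ID" 5 (by decide),
        hnot "FID" 6 (by decide)]
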